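-- pv_equiv track=rewrite | github.com/Nita121388/Merge-Annotator | backend/app/analysis.py | map_conflict_to_merge
-- ===== SOURCE A (Python) =====
-- from difflib import SequenceMatcher
--
-- def map_conflict_to_merge(diff3_lines, conflict_flags, merge_lines):
--     if not diff3_lines or not merge_lines:
--         return None
--     matcher = SequenceMatcher(a=diff3_lines, b=merge_lines, autojunk=False)
--     conflict_lines = set()
--     for tag, i1, i2, j1, j2 in matcher.get_opcodes():
--         if tag != "equal":
--             continue
--         for offset in range(i2 - i1):
--             if conflict_flags[i1 + offset]:
--                 conflict_lines.add(j1 + offset + 1)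
--     return conflict_lines
-- ===== SOURCE B (Python) =====
-- def _longest_block(a, b, alo, ahi, blo, bhi):
--     # run[i, j] = length of the common run of lines ending at a[i] and b[j]
--     # (computed inside the window only).
--     run = {}
--     for i in range(alo, ahi):
--         for j in range(blo, bhi):
--             if a[i] == b[j]:
--                 run[i, j] = run.get((i - 1, j - 1), 0) + 1
--     # Start of the longest run; on ties the one whose cells come first.
--     best_i, best_j, best_size = alo, blo, 0
--     for i in range(alo, ahi):
--         for j in range(blo, bhi):
--             size = run.get((i, j), 0)
--             if size > best_size:
--                 best_i, best_j, best_size = i - size + 1, j - size + 1, size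
--     return best_i, best_j, best_size
--
-- def _blocks(a, b, alo, ahi, blo, bhi, out):
--     # In-order divide and conquer: longest block, then both remaining windows.
--     i, j, size = _longest_block(a, b, alo, ahi, blo, bhi)
--     if size:
--         _blocks(a, b, alo, i, blo, j, out)
--         out.append((i, j, size))
--         _blocks(a, b, i + size, ahi, j + size, bhi, out)
--
-- def map_conflict_to_merge(diff3_lines, conflict_flags, merge_lines):
--     if not diff3_lines or not merge_lines:
--         return None
--     blocks = []
--     _blocks(diff3_lines, merge_lines, 0, len(diff3_lines), 0, len(merge_lines), blocks)
--     # Index table: each diff3 line index that survives into the merge -> its merge index.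
--     to_merge = {}
--     for i0, j0, size in blocks:
--         for k in range(size):
--             to_merge[i0 + k] = j0 + k
--     # Drive the collection by the flag list itself: a flagged index contributes
--     # exactly when it survives into the merge.
--     return {to_merge[i] + 1
--             for i, flag in enumerate(conflict_flags)
--             if flag and i in to_merge}
-- ===== Notes on version B (the rewrite author's own statement) =====
-- stated objective: alternative
-- what changed: B is self-contained: instead of difflib's SequenceMatcher (b2j element index, rolling per-row dict, work-queue, sort, block coalescing) plus A's get_opcodes scan with a nested offset loop, B finds each longest matching block with a 2D run-length table over the window and recurses in order on the two remaining windows, then builds a dict mapping surviving diff3 indices to merge indices and collects the flagged ones by enumerating conflict_flags; Pre_ excludes flag lists shorter than diff3_lines, where A can raise IndexError while still returning when no equal position reaches the missing tail.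
-- outside the precondition, e.g. on map_conflict_to_merge(['a'], [], ['b']): A returns set(), B returns set()
import Mathlib
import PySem

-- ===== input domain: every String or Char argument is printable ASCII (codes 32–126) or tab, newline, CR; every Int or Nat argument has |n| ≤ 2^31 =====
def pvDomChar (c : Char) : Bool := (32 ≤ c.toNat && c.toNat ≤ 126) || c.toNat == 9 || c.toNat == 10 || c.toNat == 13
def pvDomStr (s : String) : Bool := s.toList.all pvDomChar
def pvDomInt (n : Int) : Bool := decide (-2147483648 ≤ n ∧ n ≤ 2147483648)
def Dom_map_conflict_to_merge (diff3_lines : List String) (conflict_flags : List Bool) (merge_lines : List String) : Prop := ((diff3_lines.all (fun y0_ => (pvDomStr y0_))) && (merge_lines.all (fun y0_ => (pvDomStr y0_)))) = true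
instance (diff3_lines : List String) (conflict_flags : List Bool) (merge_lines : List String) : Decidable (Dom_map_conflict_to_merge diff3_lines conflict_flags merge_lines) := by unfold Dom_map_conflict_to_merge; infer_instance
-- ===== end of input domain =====

-- B is self-contained: it finds the matching blocks with a 2D run-length table plus an
-- in-order divide-and-conquer recursion (no per-element index, no work queue, no sort, no
-- block coalescing), then builds a dict mapping surviving diff3 indices to merge indices and
-- collects the flagged ones by enumerating conflict_flags (objective: alternative).
--
-- A-side helpers below are a literal port of difflib.SequenceMatcher
-- (autojunk=False, isjunk=None) as A calls it: b2j, find_longest_match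
-- (the two junk-extension while loops are omitted because isbjunk is constantly
-- False here, so they never execute), get_matching_blocks, and get_opcodes.
-- list.sort() on the found blocks is ported as a stable sort by the first component,
-- exact here because distinct found blocks have distinct first components.
-- a[i]/b[j] inside the matcher are ported with pyGetD (always in range when executed).

-- b2j = {elt: [indices]} built over enumerate(b)
def smB2j (b : List String) : PySem.Dict String (List Int) :=
  (PySem.List.enumerate b 0).foldl
    (fun d p => d.insert p.2 ((d.getD p.2 []) ++ [p.1])) PySem.Dict.empty

-- inner 'for j in b2j.get(a[i], [])' loop of find_longest_match (with continue/break)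
def flmInner (j2len : PySem.Dict Int Int) (blo bhi i : Int) :
    List Int → PySem.Dict Int Int × Int × Int × Int → PySem.Dict Int Int × Int × Int × Int
  | [], st => st
  | j :: js, st =>
    if j < blo then flmInner j2len blo bhi i js st
    else if bhi ≤ j then st
    else
      let k := j2len.getD (j - 1) 0 + 1
      let nd := st.1.insert j k
      if st.2.2.2 < k then flmInner j2len blo bhi i js (nd, i - k + 1, j - k + 1, k)
      else flmInner j2len blo bhi i js (nd, st.2.1, st.2.2.1, st.2.2.2)

-- first extension while loop (extend best block backwards over equal elements);
-- the fuel argument (besti - alo).toNat at the call site bounds the iterations exactly: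
-- each pass decrements besti and the guard alo < besti fails once besti reaches alo
def flmExtL (a b : List String) (alo blo : Int) :
    Nat → Int → Int → Int → Int × Int × Int
  | 0, besti, bestj, bestsize => (besti, bestj, bestsize)
  | fuel + 1, besti, bestj, bestsize =>
    if alo < besti ∧ blo < bestj ∧
        PySem.List.pyGetD a (besti - 1) "" = PySem.List.pyGetD b (bestj - 1) "" then
      flmExtL a b alo blo fuel (besti - 1) (bestj - 1) (bestsize + 1)
    else (besti, bestj, bestsize)

-- second extension while loop (extend best block forwards over equal elements);
-- fuel (ahi - (besti + bestsize)).toNat bounds the iterations the same way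
def flmExtR (a b : List String) (ahi bhi : Int) :
    Nat → Int → Int → Int → Int
  | 0, _, _, bestsize => bestsize
  | fuel + 1, besti, bestj, bestsize =>
    if besti + bestsize < ahi ∧ bestj + bestsize < bhi ∧
        PySem.List.pyGetD a (besti + bestsize) "" = PySem.List.pyGetD b (bestj + bestsize) "" then
      flmExtR a b ahi bhi fuel besti bestj (bestsize + 1)
    else bestsize

-- one row (one value of i) of the find_longest_match dynamic-programming loop
def flmRow (a : List String) (b2j : PySem.Dict String (List Int)) (blo bhi : Int)
    (st : PySem.Dict Int Int × Int × Int × Int) (i : Int) :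
    PySem.Dict Int Int × Int × Int × Int :=
  flmInner st.1 blo bhi i (b2j.getD (PySem.List.pyGetD a i "") [])
    (PySem.Dict.empty, st.2.1, st.2.2.1, st.2.2.2)

-- find_longest_match(alo, ahi, blo, bhi) (junk machinery dropped: isbjunk ≡ False)
def findLongestMatch (a b : List String) (b2j : PySem.Dict String (List Int))
    (alo ahi blo bhi : Int) : Int × Int × Int :=
  let st := (PySem.List.pyRange alo ahi 1).foldl (flmRow a b2j blo bhi)
    (PySem.Dict.empty, alo, blo, 0)
  let e := flmExtL a b alo blo (st.2.1 - alo).toNat st.2.1 st.2.2.1 st.2.2.2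
  (e.1, e.2.1, flmExtR a b ahi bhi (ahi - (e.1 + e.2.2)).toNat e.1 e.2.1 e.2.2)

-- the 'while queue:' loop of get_matching_blocks (queue is a stack popped from the head here,
-- children pushed so that the right-hand rectangle is popped first, as in the Python).
-- The extra fuel argument only bounds the number of iterations: the sum of 3^(rectangle span)
-- over the queue strictly decreases at every step and starts at 3^(len(a)+len(b)), so with that
-- fuel the 0-fuel branch is never reached and the recursion is exactly the Python while-loop.
def mbLoop (a b : List String) (b2j : PySem.Dict String (List Int)) :
    Nat → List (Int × Int × Int × Int) → List (Int × Int × Int) → List (Int × Int × Int)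
  | 0, _, acc => acc
  | _ + 1, [], acc => acc
  | fuel + 1, (alo, ahi, blo, bhi) :: rest, acc =>
    let r := findLongestMatch a b b2j alo ahi blo bhi
    if hk : 0 < r.2.2 then
      mbLoop a b b2j fuel
        ((if r.1 + r.2.2 < ahi ∧ r.2.1 + r.2.2 < bhi then [(r.1 + r.2.2, ahi, r.2.1 + r.2.2, bhi)] else []) ++
         (if alo < r.1 ∧ blo < r.2.1 then [(alo, r.1, blo, r.2.1)] else []) ++ rest)
        (acc ++ [r])
    else mbLoop a b b2j fuel rest acc

-- the 'first match …' coalescing pass of get_matching_blocks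
def smCoalesce (i1 j1 k1 : Int) : List (Int × Int × Int) → List (Int × Int × Int)
  | [] => if k1 ≠ 0 then [(i1, j1, k1)] else []
  | (i2, j2, k2) :: rest =>
    if i1 + k1 = i2 ∧ j1 + k1 = j2 then smCoalesce i1 j1 (k1 + k2) rest
    else (if k1 ≠ 0 then [(i1, j1, k1)] else []) ++ smCoalesce i2 j2 k2 rest

-- get_matching_blocks()
def smMatchingBlocks (a b : List String) : List (Int × Int × Int) :=
  let b2j := smB2j b
  let blocks := mbLoop a b b2j (3 ^ (a.length + b.length))
    [(0, (a.length : Int), 0, (b.length : Int))] []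
  let blocks := PySem.List.sorted blocks (fun t => t.1) false
  smCoalesce 0 0 0 blocks ++ [((a.length : Int), (b.length : Int), 0)]

-- ===== PORT A =====
-- the 'for … in self.get_matching_blocks()' loop of get_opcodes (state i, j)
def smOpcodesGo (i j : Int) : List (Int × Int × Int) → List (String × Int × Int × Int × Int)
  | [] => []
  | (ai, bj, size) :: rest =>
    let tag : String := if i < ai ∧ j < bj then "replace"
      else if i < ai then "delete" else if j < bj then "insert" else ""
    (if tag ≠ "" then [(tag, i, ai, j, bj)] else []) ++
    (if size ≠ 0 then [("equal", ai, ai + size, bj, bj + size)] else []) ++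
    smOpcodesGo (ai + size) (bj + size) rest

def smOpcodes (a b : List String) : List (String × Int × Int × Int × Int) :=
  smOpcodesGo 0 0 (smMatchingBlocks a b)

def map_conflict_to_merge (diff3_lines : List String) (conflict_flags : List Bool) (merge_lines : List String) : Option (List Int) :=
  if diff3_lines = [] ∨ merge_lines = [] then none
  else
    some ((smOpcodes diff3_lines merge_lines).foldl
      (fun s op =>
        if op.1 ≠ "equal" then s
        else (PySem.List.pyRange 0 (op.2.2.1 - op.2.1) 1).foldl
          (fun s off =>
            if PySem.List.pyGetD conflict_flags (op.2.1 + off) false then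
              PySem.Set.add s (op.2.2.2.1 + off + 1)
            else s) s)
      PySem.Set.empty)

-- ===== PORT B =====
-- run[i, j] = length of the common run of lines ending at a[i] and b[j] (window only)
def lbRun (a b : List String) (alo ahi blo bhi : Int) : PySem.Dict (Int × Int) Int :=
  (PySem.List.pyRange alo ahi 1).foldl (fun d i =>
    (PySem.List.pyRange blo bhi 1).foldl (fun d j =>
      if PySem.List.pyGetD a i "" = PySem.List.pyGetD b j "" then
        d.insert (i, j) (d.getD (i - 1, j - 1) 0 + 1)
      else d) d) PySem.Dict.empty

-- start of the longest run; on ties the one whose cells come first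
def lbBest (run : PySem.Dict (Int × Int) Int) (alo ahi blo bhi : Int) : Int × Int × Int :=
  (PySem.List.pyRange alo ahi 1).foldl (fun best i =>
    (PySem.List.pyRange blo bhi 1).foldl (fun best j =>
      let size := run.getD (i, j) 0
      if best.2.2 < size then (i - size + 1, j - size + 1, size) else best) best)
    (alo, blo, 0)

def longestBlock (a b : List String) (alo ahi blo bhi : Int) : Int × Int × Int :=
  lbBest (lbRun a b alo ahi blo bhi) alo ahi blo bhi

-- in-order divide and conquer: longest block, then both remaining windows.
-- The fuel argument only bounds the recursion depth: each recursive call shrinks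
-- the window span (ahi-alo)+(bhi-blo) by at least 2, so the top-level fuel
-- len(a)+len(b) is never exhausted and the recursion is exactly the Python one.
def recBlocks (a b : List String) :
    Nat → Int → Int → Int → Int → List (Int × Int × Int)
  | 0, _, _, _, _ => []
  | fuel + 1, alo, ahi, blo, bhi =>
    let r := longestBlock a b alo ahi blo bhi
    if 0 < r.2.2 then
      recBlocks a b fuel alo r.1 blo r.2.1 ++ [r] ++
        recBlocks a b fuel (r.1 + r.2.2) ahi (r.2.1 + r.2.2) bhi
    else []

def map_conflict_to_merge_alt (diff3_lines : List String) (conflict_flags : List Bool) (merge_lines : List String) : Option (List Int) :=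
  if diff3_lines = [] ∨ merge_lines = [] then none
  else
    let blocks := recBlocks diff3_lines merge_lines
      (diff3_lines.length + merge_lines.length)
      0 (diff3_lines.length : Int) 0 (merge_lines.length : Int)
    -- index table: each surviving diff3 line index → its merge index
    let table := blocks.foldl
      (fun t blk => (PySem.List.pyRange 0 blk.2.2 1).foldl
        (fun t k => t.insert (blk.1 + k) (blk.2.1 + k)) t)
      (PySem.Dict.empty : PySem.Dict Int Int)
    -- set comprehension driven by enumerate(conflict_flags)
    some ((PySem.List.enumerate conflict_flags 0).foldl
      (fun s p =>
        if p.2 then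
          match table.get? p.1 with
          | some j => PySem.Set.add s (j + 1)
          | none => s
        else s)
      PySem.Set.empty)

-- ===== PRECONDITION & SPEC =====
-- Pre_ excludes inputs where conflict_flags is shorter than diff3_lines (with both line lists
-- nonempty): there A indexes conflict_flags past its end and raises IndexError whenever an
-- equal diff3 position reaches the missing tail; when no equal position does, A returns
-- normally and B returns the same value (the bound is a simple sufficient guard).
def Pre_map_conflict_to_merge (diff3_lines : List String) (conflict_flags : List Bool) (merge_lines : List String) : Prop :=
  diff3_lines = [] ∨ merge_lines = [] ∨ diff3_lines.length ≤ conflict_flags.length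
instance (diff3_lines : List String) (conflict_flags : List Bool) (merge_lines : List String) : Decidable (Pre_map_conflict_to_merge diff3_lines conflict_flags merge_lines) := by unfold Pre_map_conflict_to_merge; infer_instance

def pvWitness_map_conflict_to_merge : List String × List Bool × List String :=
  (["a", "b"], [true, false], ["a", "c"])

def Spec_map_conflict_to_merge (diff3_lines : List String) (conflict_flags : List Bool) (merge_lines : List String) (out : Option (List Int)) : Prop := out = map_conflict_to_merge_alt diff3_lines conflict_flags merge_lines
instance (diff3_lines : List String) (conflict_flags : List Bool) (merge_lines : List String) (out : Option (List Int)) : Decidable (Spec_map_conflict_to_merge diff3_lines conflict_flags merge_lines out) := by unfold Spec_map_conflict_to_merge; infer_instance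

-- ===== CLAIM (what is proved, stated in full; the proofs are below) =====
def Claim_equal_map_conflict_to_merge : Prop := ∀ (diff3_lines : List String) (conflict_flags : List Bool) (merge_lines : List String), Dom_map_conflict_to_merge diff3_lines conflict_flags merge_lines → Pre_map_conflict_to_merge diff3_lines conflict_flags merge_lines → Spec_map_conflict_to_merge diff3_lines conflict_flags merge_lines (map_conflict_to_merge diff3_lines conflict_flags merge_lines)

-- ===== LEMMAS AND PROOFS =====

-- keys / key-value pairs covered by a block (i, j, k): i+u ↦ j+u for u in range(k)
def blkKvs (t : Int × Int × Int) : List (Int × Int) :=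
  (PySem.List.pyRange 0 t.2.2 1).map (fun u => (t.1 + u, t.2.1 + u))

def kvsOf (bs : List (Int × Int × Int)) : List (Int × Int) := bs.flatMap blkKvs

-- A's conflict-collecting step, per key-value pair
def addF (cf : List Bool) (s : PySem.Set Int) (p : Int × Int) : PySem.Set Int :=
  if PySem.List.pyGetD cf p.1 false then PySem.Set.add s (p.2 + 1) else s

theorem foldl_flatMap {α β σ : Type} (g : α → List β) (f : σ → β → σ) :
    ∀ (l : List α) (s : σ), (l.flatMap g).foldl f s = l.foldl (fun s t => (g t).foldl f s) s := by
  intro l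
  induction l with
  | nil => intro s; rfl
  | cons x xs ih => intro s; simp [List.flatMap_cons, List.foldl_append, ih]

-- ---- A-side: the opcodes fold equals the per-block fold ----
theorem opcodes_fold (cf : List Bool) :
    ∀ (bs : List (Int × Int × Int)) (i j : Int) (s : PySem.Set Int),
      (smOpcodesGo i j bs).foldl
        (fun s op =>
          if op.1 ≠ "equal" then s
          else (PySem.List.pyRange 0 (op.2.2.1 - op.2.1) 1).foldl
            (fun s off =>
              if PySem.List.pyGetD cf (op.2.1 + off) false then
                PySem.Set.add s (op.2.2.2.1 + off + 1)
              else s) s) s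
      = bs.foldl (fun s t => (blkKvs t).foldl (addF cf) s) s := by
  intro bs
  induction bs with
  | nil => intro i j s; rfl
  | cons t rest ih =>
    obtain ⟨ai, bj, size⟩ := t
    intro i j s
    simp only [smOpcodesGo, List.foldl_append, List.foldl_cons]
    rw [ih]
    congr 1
    by_cases hz : size = 0
    · subst hz
      have : PySem.List.pyRange 0 0 1 = [] := rfl
      simp [blkKvs, this]
      split_ifs <;> rfl
    · simp only [hz, ne_eq, not_false_eq_true, if_true]
      have harith : ai + size - ai = size := by omega
      split_ifs <;>
        simp [List.foldl_cons, harith, blkKvs, List.foldl_map, addF]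

-- lookups in a fold of inserts whose key is absent / present (keys strictly increasing)
theorem get?_foldl_insert_not_mem (x : Int) :
    ∀ (kvs : List (Int × Int)) (d : PySem.Dict Int Int), (∀ p ∈ kvs, p.1 ≠ x) →
      (kvs.foldl (fun t p => t.insert p.1 p.2) d).get? x = d.get? x := by
  intro kvs
  induction kvs with
  | nil => intro d _; rfl
  | cons q rest ih =>
    intro d h
    rw [List.foldl_cons, ih _ (fun p hp => h p (List.mem_cons_of_mem _ hp)),
      PySem.Dict.get?_insert_of_ne]
    exact fun he => h q List.mem_cons_self (he ▸ rfl)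

theorem get?_foldl_insert_mem (x j : Int) :
    ∀ (kvs : List (Int × Int)) (d : PySem.Dict Int Int),
      kvs.Pairwise (fun p q => p.1 < q.1) → (x, j) ∈ kvs →
      (kvs.foldl (fun t p => t.insert p.1 p.2) d).get? x = some j := by
  intro kvs
  induction kvs with
  | nil => intro d _ h; simp at h
  | cons q rest ih =>
    intro d hpw hmem
    obtain ⟨hhead, htail⟩ := List.pairwise_cons.mp hpw
    rcases List.mem_cons.mp hmem with he | hm
    · rw [List.foldl_cons,
        get?_foldl_insert_not_mem x rest _
          (fun p hp => by have := hhead p hp; rw [← he] at this; omega),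
        ← he]
      exact PySem.Dict.get?_insert_self _ _ _
    · rw [List.foldl_cons]
      exact ih _ htail hm

-- ---- the fold over enumerated flags equals the fold over the key-value pairs ----
theorem rangeFold (cf : List Bool) (T : PySem.Dict Int Int) :
    ∀ (n : Nat) (lo hi : Int) (kvs : List (Int × Int)) (s : PySem.Set Int),
      (hi - lo).toNat = n →
      kvs.Pairwise (fun p q => p.1 < q.1) →
      (∀ p ∈ kvs, lo ≤ p.1 ∧ p.1 < hi) →
      (∀ p ∈ kvs, T.get? p.1 = some p.2) →
      (∀ i : Int, lo ≤ i → i < hi → (∀ p ∈ kvs, p.1 ≠ i) → T.get? i = none) →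
      (PySem.List.pyRange lo hi 1).foldl
        (fun s i => if PySem.List.pyGetD cf i false then
            (match T.get? i with
             | some j => PySem.Set.add s (j + 1)
             | none => s)
          else s) s
      = kvs.foldl (addF cf) s := by
  intro n
  induction n with
  | zero =>
    intro lo hi kvs s hn hpw hbnd _ _
    rw [PySem.List.pyRange_one_eq_nil (by omega)]
    match kvs with
    | [] => rfl
    | p :: rest =>
      have := hbnd p List.mem_cons_self
      omega
  | succ n ih =>
    intro lo hi kvs s hn hpw hbnd hsome hnone
    have hlt : lo < hi := by omega
    rw [PySem.List.pyRange_one_cons hlt, List.foldl_cons]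
    match kvs with
    | [] =>
      rw [hnone lo le_rfl hlt (by simp)]
      have hstep : (if PySem.List.pyGetD cf lo false then s else s) = s := by
        split_ifs <;> rfl
      rw [hstep]
      exact ih (lo + 1) hi [] s (by omega) List.Pairwise.nil (by simp) (by simp)
        (fun i h1 h2 _ => hnone i (by omega) h2 (by simp))
    | (k, j) :: rest =>
      obtain ⟨hhead, htail⟩ := List.pairwise_cons.mp hpw
      have hkb := hbnd (k, j) List.mem_cons_self
      by_cases hke : k = lo
      · subst hke
        rw [hsome (k, j) List.mem_cons_self]
        have hstep : (if PySem.List.pyGetD cf k false then PySem.Set.add s (j + 1) else s)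
            = addF cf s (k, j) := rfl
        rw [hstep, List.foldl_cons]
        exact ih (k + 1) hi rest _ (by omega) htail
          (fun p hp => ⟨by have := hhead p hp; omega, (hbnd p (List.mem_cons_of_mem _ hp)).2⟩)
          (fun p hp => hsome p (List.mem_cons_of_mem _ hp))
          (fun i h1 h2 hne => hnone i (by omega) h2
            (fun p hp => by
              rcases List.mem_cons.mp hp with he | hm
              · subst he; omega
              · exact hne p hm))
      · have hklo : lo < k := by omega
        rw [hnone lo le_rfl hlt (fun p hp => by
          rcases List.mem_cons.mp hp with he | hm
          · subst he; omega
          · have := hhead p hm; omega)]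
        have hstep : (if PySem.List.pyGetD cf lo false then s else s) = s := by
          split_ifs <;> rfl
        rw [hstep]
        exact ih (lo + 1) hi ((k, j) :: rest) s (by omega) hpw
          (fun p hp => by
            rcases List.mem_cons.mp hp with he | hm
            · subst he; exact ⟨by omega, hkb.2⟩
            · have := hhead p hm
              have := hbnd p (List.mem_cons_of_mem _ hm)
              omega)
          hsome
          (fun i h1 h2 hne => hnone i (by omega) h2 hne)

theorem pyRange_map_shift (a b c : Int) :
    (PySem.List.pyRange a b 1).map (fun u => c + u) = PySem.List.pyRange (c + a) (c + b) 1 := by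
  rw [PySem.List.pyRange_one, PySem.List.pyRange_one, List.map_map]
  have h : c + b - (c + a) = b - a := by ring
  rw [h]
  apply List.map_congr_left
  intro k _
  simp only [Function.comp_apply]
  ring


-- ---------- the run table: characterization ----------

-- a window cell carrying a line match
def Mcell (a b : List String) (alo ahi blo bhi i j : Int) : Prop :=
  alo ≤ i ∧ i < ahi ∧ blo ≤ j ∧ j < bhi ∧
    PySem.List.pyGetD a i "" = PySem.List.pyGetD b j ""

-- the three facts the proofs use about the finished run table
def TFacts (a b : List String) (alo ahi blo bhi : Int)
    (T : PySem.Dict (Int × Int) Int) : Prop :=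
  (∀ i j : Int, T.get? (i, j) ≠ none → Mcell a b alo ahi blo bhi i j) ∧
  (∀ i j : Int, Mcell a b alo ahi blo bhi i j →
    T.getD (i, j) 0 = T.getD (i - 1, j - 1) 0 + 1) ∧
  (∀ p : Int × Int, 0 ≤ T.getD p 0)

-- partial-table invariant: cells lexicographically before (r, c) are done
def TInvP (a b : List String) (alo ahi blo bhi r c : Int)
    (D : PySem.Dict (Int × Int) Int) : Prop :=
  (∀ i j : Int, D.get? (i, j) ≠ none →
    Mcell a b alo ahi blo bhi i j ∧ (i < r ∨ (i = r ∧ j < c))) ∧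
  (∀ i j : Int, Mcell a b alo ahi blo bhi i j → (i < r ∨ (i = r ∧ j < c)) →
    D.getD (i, j) 0 = D.getD (i - 1, j - 1) 0 + 1) ∧
  (∀ p : Int × Int, 0 ≤ D.getD p 0)

theorem lbRun_row (a b : List String) (alo ahi blo bhi r : Int)
    (hr1 : alo ≤ r) (hr2 : r < ahi) :
    ∀ (n : Nat) (c : Int), (bhi - c).toNat = n → blo ≤ c →
      ∀ D, TInvP a b alo ahi blo bhi r c D →
        TInvP a b alo ahi blo bhi r bhi
          ((PySem.List.pyRange c bhi 1).foldl (fun d j =>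
            if PySem.List.pyGetD a r "" = PySem.List.pyGetD b j "" then
              d.insert (r, j) (d.getD (r - 1, j - 1) 0 + 1)
            else d) D) := by
  intro n
  induction n with
  | zero =>
    intro c hn hc D hD
    rw [PySem.List.pyRange_one_eq_nil (by omega)]
    obtain ⟨h1, h2, h3⟩ := hD
    refine ⟨?_, ?_, h3⟩
    · intro i j hne
      obtain ⟨hm, hb⟩ := h1 i j hne
      have hj : j < bhi := hm.2.2.2.1
      exact ⟨hm, by omega⟩
    · intro i j hm hb
      exact h2 i j hm (by omega)
  | succ n ih =>
    intro c hn hc D hD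
    have hlt : c < bhi := by omega
    rw [PySem.List.pyRange_one_cons hlt, List.foldl_cons]
    obtain ⟨h1, h2, h3⟩ := hD
    by_cases hmatch : PySem.List.pyGetD a r "" = PySem.List.pyGetD b c ""
    · rw [if_pos hmatch]
      have hmc : Mcell a b alo ahi blo bhi r c := ⟨hr1, hr2, hc, hlt, hmatch⟩
      apply ih (c + 1) (by omega) (by omega)
      refine ⟨?_, ?_, ?_⟩
      · intro i j hne
        by_cases he : ((i, j) : Int × Int) = (r, c)
        · have he1 : i = r := congrArg Prod.fst he
          have he2 : j = c := congrArg Prod.snd he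
          subst he1; subst he2
          exact ⟨hmc, by omega⟩
        · rw [PySem.Dict.get?_insert_of_ne _ _ he] at hne
          obtain ⟨hm, hb⟩ := h1 i j hne
          exact ⟨hm, by omega⟩
      · intro i j hm hb
        by_cases he : ((i, j) : Int × Int) = (r, c)
        · have he1 : i = r := congrArg Prod.fst he
          have he2 : j = c := congrArg Prod.snd he
          subst he1; subst he2
          rw [PySem.Dict.getD_insert_self,
            PySem.Dict.getD_insert_of_ne D _ _
              (by simp only [ne_eq, Prod.mk.injEq, not_and]; intro h'; omega)]
        · have hb' : i < r ∨ (i = r ∧ j < c) := by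
            rcases hb with hb | ⟨hb1, hb2⟩
            · exact Or.inl hb
            · refine Or.inr ⟨hb1, ?_⟩
              rcases lt_or_eq_of_le (by omega : j ≤ c) with h' | h'
              · exact h'
              · exact absurd (by rw [hb1, h']) he
          have hne2 : ((i - 1, j - 1) : Int × Int) ≠ (r, c) := by
            rcases hb' with hb'' | ⟨hb1, -⟩ <;>
              (simp only [ne_eq, Prod.mk.injEq, not_and]; intro hx; omega)
          rw [PySem.Dict.getD_insert_of_ne D _ _ he,
            PySem.Dict.getD_insert_of_ne D _ _ hne2]
          exact h2 i j hm hb'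
      · intro p
        rw [PySem.Dict.getD_insert]
        split
        · have := h3 ((r : Int) - 1, (c : Int) - 1)
          omega
        · exact h3 p
    · rw [if_neg hmatch]
      apply ih (c + 1) (by omega) (by omega)
      refine ⟨?_, ?_, h3⟩
      · intro i j hne
        obtain ⟨hm, hb⟩ := h1 i j hne
        exact ⟨hm, by omega⟩
      · intro i j hm hb
        apply h2 i j hm
        rcases hb with hb | ⟨hb1, hb2⟩
        · exact Or.inl hb
        · refine Or.inr ⟨hb1, ?_⟩
          rcases lt_or_eq_of_le (by omega : j ≤ c) with h' | h'
          · exact h'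
          · exfalso
            subst hb1; subst h'
            obtain ⟨-, -, -, -, hm5⟩ := hm
            exact hmatch hm5

theorem lbRun_rows (a b : List String) (alo ahi blo bhi : Int) :
    ∀ (n : Nat) (r : Int), (ahi - r).toNat = n → alo ≤ r →
      ∀ D, TInvP a b alo ahi blo bhi r blo D →
        TInvP a b alo ahi blo bhi ahi blo
          ((PySem.List.pyRange r ahi 1).foldl (fun d i =>
            (PySem.List.pyRange blo bhi 1).foldl (fun d j =>
              if PySem.List.pyGetD a i "" = PySem.List.pyGetD b j "" then
                d.insert (i, j) (d.getD (i - 1, j - 1) 0 + 1)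
              else d) d) D) := by
  intro n
  induction n with
  | zero =>
    intro r hn hr D hD
    rw [PySem.List.pyRange_one_eq_nil (show ahi ≤ r by omega)]
    obtain ⟨h1, h2, h3⟩ := hD
    refine ⟨?_, ?_, h3⟩
    · intro i j hne
      obtain ⟨hm, hb⟩ := h1 i j hne
      have hi2 : i < ahi := hm.2.1
      exact ⟨hm, by omega⟩
    · intro i j hm hb
      have hi2 : i < ahi := hm.2.1
      exact h2 i j hm (by omega)
  | succ n ih =>
    intro r hn hr D hD
    have hlt : r < ahi := by omega
    rw [PySem.List.pyRange_one_cons hlt, List.foldl_cons]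
    have hrow := lbRun_row a b alo ahi blo bhi r hr hlt ((bhi - blo).toNat) blo rfl le_rfl D hD
    apply ih (r + 1) (by omega) (by omega)
    obtain ⟨h1, h2, h3⟩ := hrow
    refine ⟨?_, ?_, h3⟩
    · intro i j hne
      obtain ⟨hm, hb⟩ := h1 i j hne
      exact ⟨hm, by omega⟩
    · intro i j hm hb
      apply h2 i j hm
      have hj : j < bhi := hm.2.2.2.1
      have hj0 : blo ≤ j := hm.2.2.1
      rcases hb with hb | ⟨hb1, hb2⟩
      · rcases lt_or_eq_of_le (by omega : i ≤ r) with h' | h'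
        · exact Or.inl h'
        · exact Or.inr ⟨h', by omega⟩
      · omega

theorem lbRun_facts (a b : List String) (alo ahi blo bhi : Int) :
    TFacts a b alo ahi blo bhi (lbRun a b alo ahi blo bhi) := by
  have h0 : TInvP a b alo ahi blo bhi alo blo (PySem.Dict.empty : PySem.Dict (Int × Int) Int) := by
    refine ⟨?_, ?_, ?_⟩
    · intro i j hne
      exact absurd (PySem.Dict.get?_empty ((i, j) : Int × Int)) hne
    · intro i j hm hb
      obtain ⟨hi1, -, hj1, -, -⟩ := hm
      omega
    · intro p
      simp [PySem.Dict.getD, PySem.Dict.get?_empty]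
  have h := lbRun_rows a b alo ahi blo bhi ((ahi - alo).toNat) alo rfl le_rfl
    PySem.Dict.empty h0
  obtain ⟨h1, h2, h3⟩ := h
  refine ⟨fun i j hne => (h1 i j hne).1, ?_, h3⟩
  · intro i j hm
    have hi2 : i < ahi := hm.2.1
    exact h2 i j hm (by omega)

-- loop-free consequences of TFacts
theorem tf_none {a b : List String} {alo ahi blo bhi : Int}
    {T : PySem.Dict (Int × Int) Int} (h : TFacts a b alo ahi blo bhi T)
    {i j : Int} (hm : ¬ Mcell a b alo ahi blo bhi i j) : T.getD (i, j) 0 = 0 := by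
  by_cases hn : T.get? (i, j) = none
  · simp [PySem.Dict.getD, hn]
  · exact absurd (h.1 i j hn) hm

theorem tf_pos {a b : List String} {alo ahi blo bhi : Int}
    {T : PySem.Dict (Int × Int) Int} (h : TFacts a b alo ahi blo bhi T)
    {i j : Int} (hm : Mcell a b alo ahi blo bhi i j) : 1 ≤ T.getD (i, j) 0 := by
  have := h.2.1 i j hm
  have := h.2.2 (i - 1, j - 1)
  omega

-- walking a positive run value back to its start cell (value 1)
theorem tf_chain {a b : List String} {alo ahi blo bhi : Int}
    {T : PySem.Dict (Int × Int) Int} (h : TFacts a b alo ahi blo bhi T) :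
    ∀ (v : Nat) (i j : Int), T.getD (i, j) 0 = (v : Int) + 1 →
      T.getD (i - v, j - v) 0 = 1 ∧ Mcell a b alo ahi blo bhi (i - v) (j - v) := by
  intro v
  induction v with
  | zero =>
    intro i j hv
    have hm : Mcell a b alo ahi blo bhi i j := by
      by_contra hm
      rw [tf_none h hm] at hv
      omega
    simpa using ⟨hv, hm⟩
  | succ n ihn =>
    intro i j hv
    have hm : Mcell a b alo ahi blo bhi i j := by
      by_contra hm
      rw [tf_none h hm] at hv
      omega
    have hrec := h.2.1 i j hm
    have hprev : T.getD (i - 1, j - 1) 0 = (n : Int) + 1 := by push_cast at hv ⊢; omega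
    have := ihn (i - 1) (j - 1) hprev
    have e1 : i - 1 - n = i - (n + 1 : Nat) := by push_cast; omega
    have e2 : j - 1 - n = j - (n + 1 : Nat) := by push_cast; omega
    rw [e1, e2] at this
    exact this

-- ---------- the best-block scan: characterization ----------

-- what the lex-first strict-max scan guarantees
def BFacts (a b : List String) (alo ahi blo bhi : Int)
    (T : PySem.Dict (Int × Int) Int) (best : Int × Int × Int) : Prop :=
  0 ≤ best.2.2 ∧
  (best.2.2 = 0 → best = (alo, blo, 0)) ∧
  (∀ i j : Int, alo ≤ i → i < ahi → blo ≤ j → j < bhi → T.getD (i, j) 0 ≤ best.2.2) ∧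
  (0 < best.2.2 → ∃ i j : Int, alo ≤ i ∧ i < ahi ∧ blo ≤ j ∧ j < bhi ∧
    T.getD (i, j) 0 = best.2.2 ∧ best = (i - best.2.2 + 1, j - best.2.2 + 1, best.2.2))

-- partial-scan invariant for the best-block scan
def BInvP (alo blo bhi r c : Int) (T : PySem.Dict (Int × Int) Int)
    (best : Int × Int × Int) : Prop :=
  0 ≤ best.2.2 ∧
  (best.2.2 = 0 → best = (alo, blo, 0)) ∧
  (∀ i j : Int, alo ≤ i → blo ≤ j → j < bhi → (i < r ∨ (i = r ∧ j < c)) →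
    T.getD (i, j) 0 ≤ best.2.2) ∧
  (0 < best.2.2 → ∃ i j : Int, alo ≤ i ∧ blo ≤ j ∧ j < bhi ∧
    (i < r ∨ (i = r ∧ j < c)) ∧ T.getD (i, j) 0 = best.2.2 ∧
    best = (i - best.2.2 + 1, j - best.2.2 + 1, best.2.2))

theorem lbBest_row (alo blo bhi r : Int) (hr1 : alo ≤ r) (T : PySem.Dict (Int × Int) Int) :
    ∀ (n : Nat) (c : Int), (bhi - c).toNat = n → blo ≤ c →
      ∀ best, BInvP alo blo bhi r c T best →
        BInvP alo blo bhi r bhi T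
          ((PySem.List.pyRange c bhi 1).foldl (fun best j =>
            let size := T.getD (r, j) 0
            if best.2.2 < size then (r - size + 1, j - size + 1, size) else best) best) := by
  intro n
  induction n with
  | zero =>
    intro c hn hc best hB
    rw [PySem.List.pyRange_one_eq_nil (by omega)]
    obtain ⟨b1, b2, b3, b4⟩ := hB
    refine ⟨b1, b2, ?_, ?_⟩
    · intro i j hi hj1 hj2 hb
      exact b3 i j hi hj1 hj2 (by omega)
    · intro hpos
      obtain ⟨i, j, w1, w2, w3, w4, w5, w6⟩ := b4 hpos
      refine ⟨i, j, w1, w2, w3, ?_, w5, w6⟩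
      omega
  | succ n ih =>
    intro c hn hc best hB
    have hlt : c < bhi := by omega
    have hn' : (bhi - (c + 1)).toNat = n := by omega
    have hc' : blo ≤ c + 1 := by omega
    rw [PySem.List.pyRange_one_cons hlt, List.foldl_cons]
    obtain ⟨b1, b2, b3, b4⟩ := hB
    simp only []
    by_cases hupd : best.2.2 < T.getD (r, c) 0
    · rw [if_pos hupd]
      apply ih (c + 1) hn' hc'
      refine ⟨?_, ?_, ?_, ?_⟩
      · show (0 : Int) ≤ T.getD (r, c) 0
        omega
      · intro hz
        exact absurd hz (by simp only []; omega)
      · intro i j hi hj1 hj2 hb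
        show T.getD (i, j) 0 ≤ T.getD (r, c) 0
        rcases hb with hb | ⟨hb1, hb2⟩
        · have := b3 i j hi hj1 hj2 (Or.inl hb)
          omega
        · rcases lt_or_eq_of_le (by omega : j ≤ c) with h' | h'
          · have := b3 i j hi hj1 hj2 (Or.inr ⟨hb1, h'⟩)
            omega
          · subst hb1; subst h'
            omega
      · intro _
        exact ⟨r, c, hr1, hc, hlt, Or.inr ⟨rfl, by omega⟩, rfl, rfl⟩
    · rw [if_neg hupd]
      apply ih (c + 1) hn' hc'
      refine ⟨b1, b2, ?_, ?_⟩
      · intro i j hi hj1 hj2 hb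
        rcases hb with hb | ⟨hb1, hb2⟩
        · exact b3 i j hi hj1 hj2 (Or.inl hb)
        · rcases lt_or_eq_of_le (by omega : j ≤ c) with h' | h'
          · exact b3 i j hi hj1 hj2 (Or.inr ⟨hb1, h'⟩)
          · subst hb1; subst h'
            omega
      · intro hpos
        obtain ⟨i, j, w1, w2, w3, w4, w5, w6⟩ := b4 hpos
        refine ⟨i, j, w1, w2, w3, ?_, w5, w6⟩
        omega

theorem lbBest_rows (alo ahi blo bhi : Int) (T : PySem.Dict (Int × Int) Int) :
    ∀ (n : Nat) (r : Int), (ahi - r).toNat = n → alo ≤ r → r ≤ ahi →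
      ∀ best, BInvP alo blo bhi r blo T best →
        BInvP alo blo bhi ahi blo T
          ((PySem.List.pyRange r ahi 1).foldl (fun best i =>
            (PySem.List.pyRange blo bhi 1).foldl (fun best j =>
              let size := T.getD (i, j) 0
              if best.2.2 < size then (i - size + 1, j - size + 1, size) else best) best)
            best) := by
  intro n
  induction n with
  | zero =>
    intro r hn hr hrle best hB
    have he : r = ahi := by omega
    subst he
    rw [PySem.List.pyRange_one_eq_nil le_rfl]
    exact hB
  | succ n ih =>
    intro r hn hr hrle best hB
    have hlt : r < ahi := by omega
    rw [PySem.List.pyRange_one_cons hlt, List.foldl_cons]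
    have hn' : (ahi - (r + 1)).toNat = n := by omega
    have hr' : alo ≤ r + 1 := by omega
    have hrle' : r + 1 ≤ ahi := by omega
    have hrow := lbBest_row alo blo bhi r hr T ((bhi - blo).toNat) blo rfl le_rfl best hB
    apply ih (r + 1) hn' hr' hrle'
    obtain ⟨b1, b2, b3, b4⟩ := hrow
    refine ⟨b1, b2, ?_, ?_⟩
    · intro i j hi hj1 hj2 hb
      apply b3 i j hi hj1 hj2
      clear b3 b4
      omega
    · intro hpos
      obtain ⟨i, j, w1, w2, w3, w4, w5, w6⟩ := b4 hpos
      refine ⟨i, j, w1, w2, w3, ?_, w5, w6⟩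
      omega

theorem lbBest_facts (a b : List String) (alo ahi blo bhi : Int)
    (T : PySem.Dict (Int × Int) Int) :
    BFacts a b alo ahi blo bhi T (lbBest T alo ahi blo bhi) := by
  have h0 : BInvP alo blo bhi alo blo T (alo, blo, 0) := by
    refine ⟨le_rfl, fun _ => rfl, ?_, ?_⟩
    · intro i j hi hj1 hj2 hb
      omega
    · intro hpos
      exact absurd hpos (by simp)
  by_cases hcase : alo ≤ ahi
  case neg =>
    have hnil : PySem.List.pyRange alo ahi 1 = [] :=
      PySem.List.pyRange_one_eq_nil (by omega)
    unfold lbBest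
    rw [hnil]
    refine ⟨le_rfl, fun _ => rfl, ?_, ?_⟩
    · intro i j hi1 hi2 hj1 hj2
      omega
    · intro hpos
      exact absurd hpos (by simp)
  have h := lbBest_rows alo ahi blo bhi T ((ahi - alo).toNat) alo rfl le_rfl hcase _ h0
  obtain ⟨b1, b2, b3, b4⟩ := h
  refine ⟨b1, b2, ?_, ?_⟩
  · intro i j hi1 hi2 hj1 hj2
    exact b3 i j hi1 hj1 hj2 (by omega)
  · intro hpos
    obtain ⟨i, j, w1, w2, w3, w4, w5, w6⟩ := b4 hpos
    refine ⟨i, j, w1, ?_, w2, w3, w5, w6⟩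
    rcases w4 with w4 | ⟨w41, w42⟩
    · exact w4
    · omega

-- ---------- the longest block: window bounds ----------

theorem longestBlock_bounds_pos (a b : List String) (alo ahi blo bhi : Int)
    (h : 0 < (longestBlock a b alo ahi blo bhi).2.2) :
    alo ≤ (longestBlock a b alo ahi blo bhi).1 ∧
    (longestBlock a b alo ahi blo bhi).1 + (longestBlock a b alo ahi blo bhi).2.2 ≤ ahi ∧
    blo ≤ (longestBlock a b alo ahi blo bhi).2.1 ∧
    (longestBlock a b alo ahi blo bhi).2.1 + (longestBlock a b alo ahi blo bhi).2.2 ≤ bhi := by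
  unfold longestBlock at h ⊢
  have hT := lbRun_facts a b alo ahi blo bhi
  obtain ⟨ie, je, h1, h2, h3, h4, h5, h6⟩ :=
    (lbBest_facts a b alo ahi blo bhi (lbRun a b alo ahi blo bhi)).2.2.2 h
  set L := lbBest (lbRun a b alo ahi blo bhi) alo ahi blo bhi with hL
  have e1 : L.1 = ie - L.2.2 + 1 := congrArg Prod.fst h6
  have e2 : L.2.1 = je - L.2.2 + 1 := congrArg (fun t => t.2.1) h6
  have hv : ((L.2.2 - 1).toNat : Int) = L.2.2 - 1 := by omega
  have hchain := tf_chain hT (L.2.2 - 1).toNat ie je (by rw [hv]; omega)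
  have hm := hchain.2
  have hm1 : alo ≤ ie - ((L.2.2 - 1).toNat : Int) := hm.1
  have hm2 : blo ≤ je - ((L.2.2 - 1).toNat : Int) := hm.2.2.1
  rw [hv] at hm1 hm2
  refine ⟨by omega, by omega, by omega, by omega⟩

-- ---------- A's find_longest_match equals B's longestBlock ----------

-- window shape carried through both recursions (b-side bounds index into b)
def rectOK (a b : List String) (alo ahi blo bhi : Int) : Prop :=
  0 ≤ alo ∧ alo ≤ ahi ∧ ahi ≤ (a.length : Int) ∧
  0 ≤ blo ∧ blo ≤ bhi ∧ bhi ≤ (b.length : Int)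

-- ---- the b2j index: ascending occurrence lists ----

-- the ascending list of indices of s in xs, starting at offset n
def idxList (s : String) : List String → Int → List Int
  | [], _ => []
  | x :: t, n => (if x = s then [n] else []) ++ idxList s t (n + 1)

theorem smB2j_fold (s : String) :
    ∀ (xs : List String) (n : Int) (d : PySem.Dict String (List Int)),
      (((PySem.List.enumerate xs n).foldl
        (fun d p => d.insert p.2 ((d.getD p.2 []) ++ [p.1])) d)).getD s []
        = d.getD s [] ++ idxList s xs n := by
  intro xs
  induction xs with
  | nil => intro n d; simp [PySem.List.enumerate_nil, idxList]
  | cons x t ih =>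
    intro n d
    rw [PySem.List.enumerate_cons, List.foldl_cons]
    have hred : d.insert ((n : Int), x).2 ((d.getD ((n : Int), x).2 []) ++ [((n : Int), x).1])
        = d.insert x ((d.getD x []) ++ [n]) := rfl
    rw [hred, ih, idxList]
    by_cases hx : x = s
    · subst hx
      rw [PySem.Dict.getD_insert_self, if_pos rfl]
      simp
    · rw [PySem.Dict.getD_insert_of_ne d _ _ (Ne.symm hx), if_neg hx]
      simp

theorem smB2j_getD (b : List String) (s : String) :
    (smB2j b).getD s [] = idxList s b 0 := by
  unfold smB2j
  rw [smB2j_fold s b 0 PySem.Dict.empty]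
  simp [PySem.Dict.getD, PySem.Dict.get?_empty]

theorem mem_idxList (s : String) :
    ∀ (xs : List String) (n j : Int),
      j ∈ idxList s xs n ↔ ∃ k : Nat, k < xs.length ∧ j = n + k ∧ xs[k]? = some s := by
  intro xs
  induction xs with
  | nil => intro n j; simp [idxList]
  | cons x t ih =>
    intro n j
    rw [idxList, List.mem_append, ih]
    constructor
    · rintro (hj | ⟨k, hk1, hk2, hk3⟩)
      · have hx : x = s ∧ j = n := by
          split at hj <;> simp_all
        exact ⟨0, by simp, by omega, by simp [hx.1]⟩
      · exact ⟨k + 1, by simpa using hk1, by push_cast; omega, by simpa using hk3⟩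
    · rintro ⟨k, hk1, hk2, hk3⟩
      match k with
      | 0 =>
        left
        have hx : x = s := by simpa using hk3
        rw [if_pos hx]
        simp at hk2 ⊢
        omega
      | k + 1 =>
        right
        exact ⟨k, by simpa using hk1, by push_cast at hk2 ⊢; omega, by simpa using hk3⟩

theorem idxList_lower (s : String) :
    ∀ (xs : List String) (n : Int), ∀ j ∈ idxList s xs n, n ≤ j := by
  intro xs n j hj
  rw [mem_idxList] at hj
  obtain ⟨k, -, hk, -⟩ := hj
  omega

theorem idxList_pairwise (s : String) :
    ∀ (xs : List String) (n : Int), (idxList s xs n).Pairwise (· < ·) := by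
  intro xs
  induction xs with
  | nil => intro n; simp [idxList]
  | cons x t ih =>
    intro n
    rw [idxList]
    apply List.pairwise_append.mpr
    refine ⟨by split <;> simp, ih (n + 1), ?_⟩
    intro u hu v hv
    have h1 : u = n := by split at hu <;> simp_all
    have h2 := idxList_lower s t (n + 1) v hv
    omega

-- ---- flmInner with an ascending candidate list is a plain fold over the window part ----

def plainStep (j2len : PySem.Dict Int Int) (i : Int)
    (st : PySem.Dict Int Int × Int × Int × Int) (j : Int) :
    PySem.Dict Int Int × Int × Int × Int :=
  let k := j2len.getD (j - 1) 0 + 1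
  (st.1.insert j k, if st.2.2.2 < k then (i - k + 1, j - k + 1, k) else st.2)

theorem flmInner_eq (j2len : PySem.Dict Int Int) (blo bhi i : Int) :
    ∀ (js : List Int), js.Pairwise (· < ·) → ∀ st,
      flmInner j2len blo bhi i js st
        = (js.filter (fun j => decide (blo ≤ j) && decide (j < bhi))).foldl
            (plainStep j2len i) st := by
  intro js
  induction js with
  | nil => intro _ st; rfl
  | cons j js ih =>
    intro hpw st
    obtain ⟨hhead, htail⟩ := List.pairwise_cons.mp hpw
    rw [flmInner, List.filter_cons]
    by_cases hjlo : j < blo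
    · rw [if_pos hjlo]
      have : (decide (blo ≤ j) && decide (j < bhi)) = false := by
        simp; omega
      rw [this]
      exact ih htail st
    · rw [if_neg hjlo]
      by_cases hjhi : bhi ≤ j
      · rw [if_pos hjhi]
        have hhd : (decide (blo ≤ j) && decide (j < bhi)) = false := by
          simp; omega
        rw [hhd]
        have htl : js.filter (fun j => decide (blo ≤ j) && decide (j < bhi)) = [] := by
          apply List.filter_eq_nil_iff.mpr
          intro x hx
          have := hhead x hx
          simp
          omega
        rw [htl]
        rfl
      · rw [if_neg hjhi]
        have hhd : (decide (blo ≤ j) && decide (j < bhi)) = true := by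
          simp; omega
        rw [hhd, if_pos rfl, List.foldl_cons,
          ← apply_ite (flmInner j2len blo bhi i js), ih htail]
        congr 1
        show _ = plainStep j2len i st j
        unfold plainStep
        simp only []
        split <;> rfl

-- ---- the best-update step driven by the finished table ----

def bStep (T : PySem.Dict (Int × Int) Int) (i : Int)
    (best : Int × Int × Int) (j : Int) : Int × Int × Int :=
  let size := T.getD (i, j) 0
  if best.2.2 < size then (i - size + 1, j - size + 1, size) else best

theorem bStep_nonneg (T : PySem.Dict (Int × Int) Int) (i : Int) :
    ∀ (js : List Int) (best : Int × Int × Int), 0 ≤ best.2.2 →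
      0 ≤ (js.foldl (bStep T i) best).2.2 := by
  intro js
  induction js with
  | nil => intro best h; exact h
  | cons j js ih =>
    intro best h
    rw [List.foldl_cons]
    apply ih
    unfold bStep
    simp only []
    split
    · show (0 : Int) ≤ T.getD (i, j) 0
      omega
    · exact h

theorem bStep_filter (T : PySem.Dict (Int × Int) Int) (i : Int) (p : Int → Bool) :
    ∀ (js : List Int) (best : Int × Int × Int), 0 ≤ best.2.2 →
      (∀ j ∈ js, p j = false → T.getD (i, j) 0 = 0) →
      js.foldl (bStep T i) best = (js.filter p).foldl (bStep T i) best := by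
  intro js
  induction js with
  | nil => intro best _ _; rfl
  | cons j js ih =>
    intro best hnn hz
    rw [List.foldl_cons, List.filter_cons]
    by_cases hp : p j = true
    · rw [if_pos hp, List.foldl_cons]
      apply ih _ _ (fun x hx => hz x (List.mem_cons_of_mem _ hx))
      unfold bStep
      simp only []
      split
      · show (0 : Int) ≤ T.getD (i, j) 0
        omega
      · exact hnn
    · have hp' : p j = false := by simpa using hp
      rw [hp']
      have hstep : bStep T i best j = best := by
        unfold bStep
        simp only [hz j List.mem_cons_self hp']
        rw [if_neg (by omega)]
      rw [hstep]
      exact ih _ hnn (fun x hx => hz x (List.mem_cons_of_mem _ hx))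

-- the window part of the occurrence list is the filtered column range
theorem W_eq_F (a b : List String) (blo bhi i : Int)
    (hb1 : 0 ≤ blo) (hb2 : bhi ≤ (b.length : Int)) :
    (idxList (PySem.List.pyGetD a i "") b 0).filter
        (fun j => decide (blo ≤ j) && decide (j < bhi))
      = (PySem.List.pyRange blo bhi 1).filter
        (fun j => PySem.List.pyGetD b j "" == PySem.List.pyGetD a i "") := by
  set s := PySem.List.pyGetD a i "" with hs
  have hpwW : ((idxList s b 0).filter
      (fun j => decide (blo ≤ j) && decide (j < bhi))).Pairwise (· < ·) :=
    (idxList_pairwise s b 0).filter _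
  have hpwF : ((PySem.List.pyRange blo bhi 1).filter
      (fun j => PySem.List.pyGetD b j "" == s)).Pairwise (· < ·) :=
    (PySem.List.pairwise_lt_pyRange_one blo bhi).filter _
  have hmem : ∀ j : Int, (j ∈ (idxList s b 0).filter
      (fun j => decide (blo ≤ j) && decide (j < bhi)))
      ↔ (j ∈ (PySem.List.pyRange blo bhi 1).filter
        (fun j => PySem.List.pyGetD b j "" == s)) := by
    intro j
    rw [List.mem_filter, List.mem_filter, mem_idxList, PySem.List.mem_pyRange_one]
    constructor
    · rintro ⟨⟨k, hk1, hk2, hk3⟩, hw⟩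
      simp only [Bool.and_eq_true, decide_eq_true_eq] at hw
      refine ⟨⟨hw.1, hw.2⟩, ?_⟩
      subst hk2
      rw [beq_iff_eq]
      simp only [zero_add]
      rw [PySem.List.pyGetD_natCast, List.getD_eq_getElem?_getD, hk3]
      rfl
    · rintro ⟨⟨hj1, hj2⟩, hv⟩
      rw [beq_iff_eq] at hv
      have hj0 : 0 ≤ j := by omega
      have hjlen : j < (b.length : Int) := by omega
      refine ⟨⟨j.toNat, by omega, by omega, ?_⟩, by simp; omega⟩
      rw [PySem.List.pyGetD_eq_getElem b "" hj0 hjlen] at hv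
      rw [List.getElem?_eq_getElem (by omega), hv]
  apply List.eq_of_perm_of_sorted (le := (· ≤ ·))
  · intro x y _ _ h1 h2
    omega
  · exact hpwW.imp le_of_lt
  · exact hpwF.imp le_of_lt
  · exact (List.perm_ext_iff_of_nodup
      (hpwW.imp fun h => ne_of_lt h) (hpwF.imp fun h => ne_of_lt h)).mpr hmem

-- membership in the filtered column range is exactly a window match cell
theorem mem_F_iff (a b : List String) (alo ahi blo bhi i : Int)
    (hi1 : alo ≤ i) (hi2 : i < ahi) :
    ∀ j : Int, (j ∈ (PySem.List.pyRange blo bhi 1).filter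
        (fun j => PySem.List.pyGetD b j "" == PySem.List.pyGetD a i ""))
      ↔ Mcell a b alo ahi blo bhi i j := by
  intro j
  rw [List.mem_filter, PySem.List.mem_pyRange_one, beq_iff_eq]
  constructor
  · rintro ⟨⟨h1, h2⟩, h3⟩
    exact ⟨hi1, hi2, h1, h2, h3.symm⟩
  · rintro ⟨-, -, h1, h2, h3⟩
    exact ⟨⟨h1, h2⟩, h3.symm⟩

-- splitting the paired fold of flmInner's plain step
theorem plain_split (j2 : PySem.Dict Int Int) (i : Int) :
    ∀ (js : List Int) (A : PySem.Dict Int Int) (B : Int × Int × Int),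
      js.foldl (plainStep j2 i) (A, B)
        = (js.foldl (fun D j => D.insert j (j2.getD (j - 1) 0 + 1)) A,
           js.foldl (fun best j =>
             let k := j2.getD (j - 1) 0 + 1
             if best.2.2 < k then (i - k + 1, j - k + 1, k) else best) B) := by
  intro js
  induction js with
  | nil => intro A B; rfl
  | cons j js ih =>
    intro A B
    rw [List.foldl_cons, List.foldl_cons, List.foldl_cons]
    exact ih _ _

-- one row of A's DP loop: the produced row dict is row i of the finished table,
-- and the best triple evolves by the table-driven scan step over the full column range
theorem flmRow_eq (a b : List String) (alo ahi blo bhi : Int)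
    (hb1 : 0 ≤ blo) (hb2 : bhi ≤ (b.length : Int)) (i : Int)
    (hi1 : alo ≤ i) (hi2 : i < ahi)
    (st : PySem.Dict Int Int × Int × Int × Int)
    (hdict : ∀ j : Int, st.1.getD j 0 = (lbRun a b alo ahi blo bhi).getD (i - 1, j) 0)
    (hbest : 0 ≤ st.2.2.2) :
    (∀ j : Int, (flmRow a (smB2j b) blo bhi st i).1.getD j 0
      = (lbRun a b alo ahi blo bhi).getD (i, j) 0) ∧
    (flmRow a (smB2j b) blo bhi st i).2
      = (PySem.List.pyRange blo bhi 1).foldl (bStep (lbRun a b alo ahi blo bhi) i) st.2 := by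
  have hT := lbRun_facts a b alo ahi blo bhi
  set T := lbRun a b alo ahi blo bhi with hTd
  unfold flmRow
  rw [smB2j_getD, flmInner_eq _ _ _ _ _ (idxList_pairwise _ b 0), plain_split]
  set W := (idxList (PySem.List.pyGetD a i "") b 0).filter
    (fun j => decide (blo ≤ j) && decide (j < bhi)) with hW
  have hWF := W_eq_F a b blo bhi i hb1 hb2
  have hmemW : ∀ j : Int, j ∈ W ↔ Mcell a b alo ahi blo bhi i j := by
    intro j
    rw [hW, hWF]
    exact mem_F_iff a b alo ahi blo bhi i hi1 hi2 j
  have hkval : ∀ j ∈ W, st.1.getD (j - 1) 0 + 1 = T.getD (i, j) 0 := by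
    intro j hj
    rw [hdict (j - 1), (hT.2.1 i j ((hmemW j).mp hj))]
  constructor
  · -- the dict component
    intro j0
    simp only []
    have hfold : W.foldl (fun D j => D.insert j (st.1.getD (j - 1) 0 + 1))
        (PySem.Dict.empty : PySem.Dict Int Int)
        = (W.map (fun j => (j, st.1.getD (j - 1) 0 + 1))).foldl
            (fun D p => D.insert p.1 p.2) (PySem.Dict.empty : PySem.Dict Int Int) := by
      rw [List.foldl_map]
    rw [hfold]
    have hpwW : W.Pairwise (· < ·) := (idxList_pairwise _ b 0).filter _
    by_cases hj0 : j0 ∈ W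
    · have hget := get?_foldl_insert_mem j0 (st.1.getD (j0 - 1) 0 + 1)
        (W.map (fun j => (j, st.1.getD (j - 1) 0 + 1)))
        (PySem.Dict.empty : PySem.Dict Int Int)
        (by
          rw [List.pairwise_map]
          exact hpwW.imp (fun h => h))
        (List.mem_map.mpr ⟨j0, hj0, rfl⟩)
      rw [PySem.Dict.getD, hget]
      exact hkval j0 hj0
    · have hget := get?_foldl_insert_not_mem j0
        (W.map (fun j => (j, st.1.getD (j - 1) 0 + 1)))
        (PySem.Dict.empty : PySem.Dict Int Int)
        (by
          intro p hp
          obtain ⟨j, hj, rfl⟩ := List.mem_map.mp hp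
          intro he
          exact hj0 (he ▸ hj))
      rw [PySem.Dict.getD, hget, PySem.Dict.get?_empty]
      exact (tf_none hT (fun hm => hj0 ((hmemW j0).mpr hm))).symm
  · -- the best component
    simp only []
    have hcongr : W.foldl (fun best j =>
        let k := st.1.getD (j - 1) 0 + 1
        if best.2.2 < k then (i - k + 1, j - k + 1, k) else best) st.2
        = W.foldl (bStep T i) st.2 := by
      apply PySem.List.foldl_congr_mem
      intro s j hj
      unfold bStep
      simp only []
      rw [hkval j hj]
    rw [hcongr, hW, hWF,
      ← bStep_filter T i (fun j => PySem.List.pyGetD b j "" == PySem.List.pyGetD a i "")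
        (PySem.List.pyRange blo bhi 1) st.2 hbest]
    intro j hj hfalse
    apply tf_none hT
    intro hm
    rw [beq_eq_false_iff_ne] at hfalse
    exact hfalse hm.2.2.2.2.symm

-- all rows: A's DP fold computes B's scan of the finished table
theorem flmRows_eq (a b : List String) (alo ahi blo bhi : Int)
    (hb1 : 0 ≤ blo) (hb2 : bhi ≤ (b.length : Int)) :
    ∀ (n : Nat) (r : Int), (ahi - r).toNat = n → alo ≤ r →
      ∀ st : PySem.Dict Int Int × Int × Int × Int,
        (∀ j : Int, st.1.getD j 0 = (lbRun a b alo ahi blo bhi).getD (r - 1, j) 0) →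
        0 ≤ st.2.2.2 →
        ((PySem.List.pyRange r ahi 1).foldl (flmRow a (smB2j b) blo bhi) st).2
          = (PySem.List.pyRange r ahi 1).foldl
              (fun best i => (PySem.List.pyRange blo bhi 1).foldl
                (bStep (lbRun a b alo ahi blo bhi) i) best) st.2 := by
  intro n
  induction n with
  | zero =>
    intro r hn hr st hdict hbest
    rw [PySem.List.pyRange_one_eq_nil (by omega : ahi ≤ r)]
    rfl
  | succ n ih =>
    intro r hn hr st hdict hbest
    have hlt : r < ahi := by omega
    rw [PySem.List.pyRange_one_cons hlt, List.foldl_cons, List.foldl_cons]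
    obtain ⟨hd, hb⟩ := flmRow_eq a b alo ahi blo bhi hb1 hb2 r hr hlt st hdict hbest
    have hnext := ih (r + 1) (by omega) (by omega) (flmRow a (smB2j b) blo bhi st r)
      (by intro j; rw [hd j, show r + 1 - 1 = r by omega])
      (by rw [hb]; exact bStep_nonneg _ _ _ _ hbest)
    rw [hnext, hb]

-- the extension loops stop immediately when the guard fails
theorem flmExtL_stop (a b : List String) (alo blo : Int) (fuel : Nat) (bi bj bs : Int)
    (hg : ¬(alo < bi ∧ blo < bj ∧
      PySem.List.pyGetD a (bi - 1) "" = PySem.List.pyGetD b (bj - 1) "")) :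
    flmExtL a b alo blo fuel bi bj bs = (bi, bj, bs) := by
  cases fuel with
  | zero => rfl
  | succ n => rw [flmExtL, if_neg hg]

theorem flmExtR_stop (a b : List String) (ahi bhi : Int) (fuel : Nat) (bi bj bs : Int)
    (hg : ¬(bi + bs < ahi ∧ bj + bs < bhi ∧
      PySem.List.pyGetD a (bi + bs) "" = PySem.List.pyGetD b (bj + bs) "")) :
    flmExtR a b ahi bhi fuel bi bj bs = bs := by
  cases fuel with
  | zero => rfl
  | succ n => rw [flmExtR, if_neg hg]

theorem flm_eq_lb (a b : List String) (alo ahi blo bhi : Int)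
    (hrect : rectOK a b alo ahi blo bhi) :
    findLongestMatch a b (smB2j b) alo ahi blo bhi = longestBlock a b alo ahi blo bhi := by
  obtain ⟨hr1, hr2, hr3, hr4, hr5, hr6⟩ := hrect
  have hT := lbRun_facts a b alo ahi blo bhi
  have hB := lbBest_facts a b alo ahi blo bhi (lbRun a b alo ahi blo bhi)
  set T := lbRun a b alo ahi blo bhi with hTd
  set L := lbBest T alo ahi blo bhi with hL
  -- positions of the best block (used by both extension arguments)
  have hnn : 0 ≤ L.2.2 := hB.1
  have hstart : L.2.2 = 0 → L = (alo, blo, 0) := hB.2.1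
  have hmax := hB.2.2.1
  have hLval : T.getD (L.1 + L.2.2 - 1, L.2.1 + L.2.2 - 1) 0 = L.2.2 ∧
      alo ≤ L.1 ∧ blo ≤ L.2.1 ∧ L.1 + L.2.2 ≤ ahi ∧ L.2.1 + L.2.2 ≤ bhi ∧
      (0 < L.2.2 → T.getD (L.1, L.2.1) 0 = 1) := by
    by_cases hz : L.2.2 = 0
    · have he := hstart hz
      have e1 : L.1 = alo := congrArg Prod.fst he
      have e2 : L.2.1 = blo := congrArg (fun t => t.2.1) he
      have hnm : ¬ Mcell a b alo ahi blo bhi (L.1 + L.2.2 - 1) (L.2.1 + L.2.2 - 1) := by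
        intro hm
        have := hm.1
        omega
      rw [tf_none hT hnm]
      refine ⟨by omega, by omega, by omega, by omega, by omega, fun h => absurd h (by omega)⟩
    · obtain ⟨ie, je, w1, w2, w3, w4, w5, w6⟩ := hB.2.2.2 (by omega)
      have e1 : L.1 = ie - L.2.2 + 1 := congrArg Prod.fst w6
      have e2 : L.2.1 = je - L.2.2 + 1 := congrArg (fun t => t.2.1) w6
      have hv : ((L.2.2 - 1).toNat : Int) = L.2.2 - 1 := by omega
      have hchain := tf_chain hT (L.2.2 - 1).toNat ie je (by rw [hv]; omega)
      have hc1 := hchain.1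
      have hm := hchain.2
      have hm1 : alo ≤ ie - ((L.2.2 - 1).toNat : Int) := hm.1
      have hm2 : blo ≤ je - ((L.2.2 - 1).toNat : Int) := hm.2.2.1
      rw [hv] at hc1 hm1 hm2
      have hee1 : L.1 + L.2.2 - 1 = ie := by omega
      have hee2 : L.2.1 + L.2.2 - 1 = je := by omega
      rw [hee1, hee2]
      refine ⟨w5, by omega, by omega, by omega, by omega, ?_⟩
      intro _
      have : L.1 = ie - (L.2.2 - 1) := by omega
      rw [this, e2]
      have : je - L.2.2 + 1 = je - (L.2.2 - 1) := by omega
      rw [this]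
      exact hc1
  obtain ⟨hend, hp1, hp2, hp3, hp4, hone⟩ := hLval
  -- the extension guards both fail
  have hgL : ¬(alo < L.1 ∧ blo < L.2.1 ∧
      PySem.List.pyGetD a (L.1 - 1) "" = PySem.List.pyGetD b (L.2.1 - 1) "") := by
    rintro ⟨g1, g2, g3⟩
    by_cases hz : L.2.2 = 0
    · have := congrArg Prod.fst (hstart hz)
      omega
    · have h1 := hone (by omega)
      have hm : Mcell a b alo ahi blo bhi (L.1 - 1) (L.2.1 - 1) :=
        ⟨by omega, by omega, by omega, by omega, g3⟩
      have hch := (tf_chain hT 0 L.1 L.2.1 (by simpa using h1)).2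
      simp only [Nat.cast_zero, sub_zero] at hch
      have hrec := hT.2.1 L.1 L.2.1 hch
      have hpos := tf_pos hT hm
      omega
  have hgR : ¬(L.1 + L.2.2 < ahi ∧ L.2.1 + L.2.2 < bhi ∧
      PySem.List.pyGetD a (L.1 + L.2.2) "" = PySem.List.pyGetD b (L.2.1 + L.2.2) "") := by
    rintro ⟨g1, g2, g3⟩
    have hm : Mcell a b alo ahi blo bhi (L.1 + L.2.2) (L.2.1 + L.2.2) :=
      ⟨by omega, g1, by omega, g2, g3⟩
    have hrec := hT.2.1 _ _ hm
    have e1 : L.1 + L.2.2 - 1 = L.1 + L.2.2 - 1 := rfl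
    rw [hend] at hrec
    have := hmax (L.1 + L.2.2) (L.2.1 + L.2.2) (by omega) g1 (by omega) g2
    omega
  -- assemble
  simp only [findLongestMatch]
  have hst := flmRows_eq a b alo ahi blo bhi hr4 hr6 ((ahi - alo).toNat) alo rfl le_rfl
    (PySem.Dict.empty, alo, blo, 0)
    (by
      intro j
      have hnm : ¬ Mcell a b alo ahi blo bhi (alo - 1) j := by
        intro hm
        have := hm.1
        omega
      rw [tf_none hT hnm]
      simp [PySem.Dict.getD, PySem.Dict.get?_empty])
    le_rfl
  simp only [] at hst
  rw [hst]
  have hbest : (PySem.List.pyRange alo ahi 1).foldl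
      (fun best i => (PySem.List.pyRange blo bhi 1).foldl (bStep T i) best)
      ((PySem.Dict.empty : PySem.Dict Int Int), alo, blo, 0).2 = L := rfl
  rw [hbest]
  rw [flmExtL_stop a b alo blo _ L.1 L.2.1 L.2.2 hgL]
  rw [flmExtR_stop a b ahi bhi _ L.1 L.2.1 L.2.2 hgR]
  rfl

-- ---------- A's queue+sort+coalesce equals B's in-order recursion ----------

-- a block splits into two adjacent blocks with the same key-value pairs
theorem blkKvs_split (i1 j1 k1 k2 : Int) (h1 : 0 ≤ k1) (h2 : 0 ≤ k2) :
    blkKvs (i1, j1, k1 + k2) = blkKvs (i1, j1, k1) ++ blkKvs (i1 + k1, j1 + k1, k2) := by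
  unfold blkKvs
  simp only []
  rw [PySem.List.pyRange_one_append 0 k1 (k1 + k2) h1 (by omega), List.map_append]
  congr 1
  have hshift := pyRange_map_shift 0 k2 k1
  simp only [add_zero] at hshift
  rw [← hshift, List.map_map]
  apply List.map_congr_left
  intro u _
  simp only [Function.comp_apply, Prod.mk.injEq]
  constructor <;> ring

-- kvsOf is unchanged by the coalescing pass (merging adjacent blocks concatenates
-- the very same key-value pairs)
theorem coalesce_kvs : ∀ (bs : List (Int × Int × Int)) (i1 j1 k1 : Int), 0 ≤ k1 →
    (∀ t ∈ bs, 0 ≤ t.2.2) →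
    kvsOf (smCoalesce i1 j1 k1 bs) = blkKvs (i1, j1, k1) ++ kvsOf bs := by
  intro bs
  induction bs with
  | nil =>
    intro i1 j1 k1 hk hpos
    simp only [smCoalesce]
    split_ifs with h
    · simp [kvsOf]
    · have hz : k1 = 0 := by omega
      subst hz
      simp [kvsOf, blkKvs, PySem.List.pyRange_one_eq_nil le_rfl]
  | cons t rest ih =>
    intro i1 j1 k1 hk hpos
    obtain ⟨i2, j2, k2⟩ := t
    have hk2 : 0 ≤ k2 := by simpa using hpos (i2, j2, k2) List.mem_cons_self
    simp only [smCoalesce]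
    by_cases hm : i1 + k1 = i2 ∧ j1 + k1 = j2
    · rw [if_pos hm]
      obtain ⟨hm1, hm2⟩ := hm
      rw [ih i1 j1 (k1 + k2) (by omega) (fun t ht => hpos t (List.mem_cons_of_mem _ ht))]
      have hsplit : blkKvs (i1, j1, k1 + k2) = blkKvs (i1, j1, k1) ++ blkKvs (i2, j2, k2) := by
        rw [blkKvs_split i1 j1 k1 k2 hk hk2, hm1, hm2]
      rw [hsplit, List.append_assoc]
      simp [kvsOf]
    · rw [if_neg hm]
      have hkvs : kvsOf ((if k1 ≠ 0 then [(i1, j1, k1)] else []) ++ smCoalesce i2 j2 k2 rest)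
          = blkKvs (i1, j1, k1) ++ kvsOf (smCoalesce i2 j2 k2 rest) := by
        split_ifs with h
        · simp [kvsOf]
        · have hz : k1 = 0 := by omega
          subst hz
          simp [kvsOf, blkKvs, PySem.List.pyRange_one_eq_nil le_rfl]
      rw [hkvs, ih i2 j2 k2 hk2 (fun t ht => hpos t (List.mem_cons_of_mem _ ht))]
      simp [kvsOf]

-- every block of the recursion lies inside its window and has positive size
theorem recBlocks_bounds (a b : List String) :
    ∀ (fuel : Nat) (alo ahi blo bhi : Int), ∀ t ∈ recBlocks a b fuel alo ahi blo bhi,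
      alo ≤ t.1 ∧ t.1 + t.2.2 ≤ ahi ∧ blo ≤ t.2.1 ∧ t.2.1 + t.2.2 ≤ bhi ∧ 0 < t.2.2 := by
  intro fuel
  induction fuel with
  | zero => intro alo ahi blo bhi t ht; simp [recBlocks] at ht
  | succ n ih =>
    intro alo ahi blo bhi t ht
    rw [recBlocks] at ht
    by_cases hk : 0 < (longestBlock a b alo ahi blo bhi).2.2
    · rw [if_pos hk] at ht
      obtain ⟨g1, g2, g3, g4⟩ := longestBlock_bounds_pos a b alo ahi blo bhi hk
      rcases List.mem_append.mp ht with ht | ht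
      · rcases List.mem_append.mp ht with ht | ht
        · have := ih alo (longestBlock a b alo ahi blo bhi).1 blo
            (longestBlock a b alo ahi blo bhi).2.1 t ht
          refine ⟨this.1, by omega, this.2.2.1, by omega, this.2.2.2.2⟩
        · simp only [List.mem_singleton] at ht
          subst ht
          exact ⟨g1, g2, g3, g4, hk⟩
      · have := ih ((longestBlock a b alo ahi blo bhi).1 + (longestBlock a b alo ahi blo bhi).2.2)
          ahi ((longestBlock a b alo ahi blo bhi).2.1 + (longestBlock a b alo ahi blo bhi).2.2)
          bhi t ht
        refine ⟨by omega, this.2.1, by omega, this.2.2.2.1, this.2.2.2.2⟩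
    · rw [if_neg hk] at ht
      simp at ht

-- the recursion emits its blocks in order: each ends before the next starts
theorem recBlocks_pairwise (a b : List String) :
    ∀ (fuel : Nat) (alo ahi blo bhi : Int),
      (recBlocks a b fuel alo ahi blo bhi).Pairwise (fun t t' => t.1 + t.2.2 ≤ t'.1) := by
  intro fuel
  induction fuel with
  | zero => intro alo ahi blo bhi; simp [recBlocks]
  | succ n ih =>
    intro alo ahi blo bhi
    rw [recBlocks]
    by_cases hk : 0 < (longestBlock a b alo ahi blo bhi).2.2
    · rw [if_pos hk, List.append_assoc]
      obtain ⟨g1, g2, g3, g4⟩ := longestBlock_bounds_pos a b alo ahi blo bhi hk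
      apply List.pairwise_append.mpr
      refine ⟨ih _ _ _ _, ?_, ?_⟩
      · apply List.pairwise_append.mpr
        refine ⟨by simp, ih _ _ _ _, ?_⟩
        intro u hu v hv
        simp only [List.mem_singleton] at hu
        subst hu
        have := recBlocks_bounds a b n _ _ _ _ v hv
        omega
      · intro u hu v hv
        have hul := recBlocks_bounds a b n _ _ _ _ u hu
        rcases List.mem_append.mp hv with hv | hv
        · simp only [List.mem_singleton] at hv
          subst hv
          omega
        · have hvr := recBlocks_bounds a b n _ _ _ _ v hv
          omega
    · rw [if_neg hk]
      simp

-- a window that is empty on either side yields no blocks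
theorem recBlocks_degenerate (a b : List String) (fuel : Nat) (alo ahi blo bhi : Int)
    (h : ahi ≤ alo ∨ bhi ≤ blo) :
    recBlocks a b fuel alo ahi blo bhi = [] := by
  cases fuel with
  | zero => rfl
  | succ n =>
    rw [recBlocks]
    have hk : ¬ 0 < (longestBlock a b alo ahi blo bhi).2.2 := by
      intro hk
      obtain ⟨g1, g2, g3, g4⟩ := longestBlock_bounds_pos a b alo ahi blo bhi hk
      omega
    rw [if_neg hk]

-- the recursion result does not depend on the fuel once it covers the window span
theorem recBlocks_fuel (a b : List String) :
    ∀ (f g : Nat) (alo ahi blo bhi : Int),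
      (ahi - alo).toNat + (bhi - blo).toNat ≤ f →
      (ahi - alo).toNat + (bhi - blo).toNat ≤ g →
      recBlocks a b f alo ahi blo bhi = recBlocks a b g alo ahi blo bhi := by
  intro f
  induction f with
  | zero =>
    intro g alo ahi blo bhi hf hg
    have hz : (ahi - alo).toNat + (bhi - blo).toNat = 0 := by omega
    rw [recBlocks, (recBlocks_degenerate a b g alo ahi blo bhi (by omega)).symm]
  | succ n ih =>
    intro g alo ahi blo bhi hf hg
    match g with
    | 0 =>
      have hz : (ahi - alo).toNat + (bhi - blo).toNat = 0 := by omega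
      rw [recBlocks, recBlocks_degenerate a b (n + 1) alo ahi blo bhi (by omega)]
    | g + 1 =>
      rw [recBlocks, recBlocks]
      by_cases hk : 0 < (longestBlock a b alo ahi blo bhi).2.2
      · rw [if_pos hk, if_pos hk]
        obtain ⟨g1, g2, g3, g4⟩ := longestBlock_bounds_pos a b alo ahi blo bhi hk
        rw [ih g alo (longestBlock a b alo ahi blo bhi).1 blo
            (longestBlock a b alo ahi blo bhi).2.1 (by omega) (by omega),
          ih g ((longestBlock a b alo ahi blo bhi).1 + (longestBlock a b alo ahi blo bhi).2.2)
            ahi ((longestBlock a b alo ahi blo bhi).2.1 + (longestBlock a b alo ahi blo bhi).2.2)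
            bhi (by omega) (by omega)]
      · rw [if_neg hk, if_neg hk]

-- the queue loop emits, in some order, exactly the blocks the recursion emits
theorem mbLoop_perm (a b : List String) :
    ∀ (fuel : Nat) (Q : List (Int × Int × Int × Int)) (acc : List (Int × Int × Int)),
      (Q.map (fun r => 3 ^ ((r.2.1 - r.1).toNat + (r.2.2.2 - r.2.2.1).toNat))).sum ≤ fuel →
      (∀ r ∈ Q, rectOK a b r.1 r.2.1 r.2.2.1 r.2.2.2) →
      (mbLoop a b (smB2j b) fuel Q acc).Perm
        (acc ++ Q.flatMap (fun r =>
          recBlocks a b ((r.2.1 - r.1).toNat + (r.2.2.2 - r.2.2.1).toNat)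
            r.1 r.2.1 r.2.2.1 r.2.2.2)) := by
  intro fuel
  induction fuel with
  | zero =>
    intro Q acc hfuel hQ
    match Q with
    | [] => rw [mbLoop]; simp
    | r :: rest =>
      exfalso
      have h1 : 1 ≤ 3 ^ ((r.2.1 - r.1).toNat + (r.2.2.2 - r.2.2.1).toNat) :=
        Nat.one_le_pow _ _ (by norm_num)
      rw [List.map_cons, List.sum_cons] at hfuel
      omega
  | succ n ih =>
    intro Q acc hfuel hQ
    match Q with
    | [] => rw [mbLoop]; simp
    | (alo, ahi, blo, bhi) :: rest =>
      have hrect : rectOK a b alo ahi blo bhi := hQ (alo, ahi, blo, bhi) List.mem_cons_self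
      have hflm := flm_eq_lb a b alo ahi blo bhi hrect
      obtain ⟨q1, q2, q3, q4, q5, q6⟩ := hrect
      set L := longestBlock a b alo ahi blo bhi with hL
      set w := (ahi - alo).toNat + (bhi - blo).toNat with hw
      have hfuel2 : 3 ^ w + (rest.map
          (fun r => 3 ^ ((r.2.1 - r.1).toNat + (r.2.2.2 - r.2.2.1).toNat))).sum ≤ n + 1 := by
        rw [List.map_cons, List.sum_cons] at hfuel
        simpa [← hw] using hfuel
      have hw1 : 1 ≤ 3 ^ w := Nat.one_le_pow _ _ (by norm_num)
      by_cases hk : 0 < (findLongestMatch a b (smB2j b) alo ahi blo bhi).2.2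
      · rw [mbLoop, dif_pos hk]
        rw [hflm] at hk ⊢
        obtain ⟨g1, g2, g3, g4⟩ := longestBlock_bounds_pos a b alo ahi blo bhi hk
        rw [← hL] at g1 g2 g3 g4
        have hw2 : 2 ≤ w := by rw [hw]; omega
        have hpowL : 3 ^ ((L.1 - alo).toNat + (L.2.1 - blo).toNat) ≤ 3 ^ (w - 2) :=
          Nat.pow_le_pow_right (by norm_num) (by rw [hw]; omega)
        have hpowR : 3 ^ ((ahi - (L.1 + L.2.2)).toNat + (bhi - (L.2.1 + L.2.2)).toNat)
            ≤ 3 ^ (w - 2) :=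
          Nat.pow_le_pow_right (by norm_num) (by rw [hw]; omega)
        have hpow9 : 3 ^ w = 3 ^ (w - 2) * 9 := by
          calc 3 ^ w = 3 ^ ((w - 2) + 2) := by rw [show (w - 2) + 2 = w by omega]
            _ = 3 ^ (w - 2) * 9 := by rw [pow_add]; norm_num
        have hpow1 : 1 ≤ 3 ^ (w - 2) := Nat.one_le_pow _ _ (by norm_num)
        -- fuel bound for the recursive call
        have hfuel' : (((if L.1 + L.2.2 < ahi ∧ L.2.1 + L.2.2 < bhi then
              [(L.1 + L.2.2, ahi, L.2.1 + L.2.2, bhi)] else []) ++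
              (if alo < L.1 ∧ blo < L.2.1 then [(alo, L.1, blo, L.2.1)] else []) ++ rest).map
            (fun r => 3 ^ ((r.2.1 - r.1).toNat + (r.2.2.2 - r.2.2.1).toNat))).sum ≤ n := by
          rw [List.map_append, List.map_append, List.sum_append, List.sum_append]
          have hbR : (((if L.1 + L.2.2 < ahi ∧ L.2.1 + L.2.2 < bhi then
                [(L.1 + L.2.2, ahi, L.2.1 + L.2.2, bhi)] else []) : List (Int × Int × Int × Int)).map
              (fun r => 3 ^ ((r.2.1 - r.1).toNat + (r.2.2.2 - r.2.2.1).toNat))).sum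
              ≤ 3 ^ (w - 2) := by
            split_ifs with h
            · simpa using hpowR
            · simp
          have hbL : (((if alo < L.1 ∧ blo < L.2.1 then
                [(alo, L.1, blo, L.2.1)] else []) : List (Int × Int × Int × Int)).map
              (fun r => 3 ^ ((r.2.1 - r.1).toNat + (r.2.2.2 - r.2.2.1).toNat))).sum
              ≤ 3 ^ (w - 2) := by
            split_ifs with h
            · simpa using hpowL
            · simp
          omega
        have hQ' : ∀ r ∈ ((if L.1 + L.2.2 < ahi ∧ L.2.1 + L.2.2 < bhi then
              [(L.1 + L.2.2, ahi, L.2.1 + L.2.2, bhi)] else []) ++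
              (if alo < L.1 ∧ blo < L.2.1 then [(alo, L.1, blo, L.2.1)] else []) ++ rest),
            rectOK a b r.1 r.2.1 r.2.2.1 r.2.2.2 := by
          intro r hr
          rcases List.mem_append.mp hr with hr | hr
          · rcases List.mem_append.mp hr with hr | hr
            · split_ifs at hr with h
              · simp only [List.mem_singleton] at hr
                subst hr
                exact ⟨show (0 : Int) ≤ L.1 + L.2.2 by omega,
                  show L.1 + L.2.2 ≤ ahi by omega,
                  show ahi ≤ (a.length : Int) by omega,
                  show (0 : Int) ≤ L.2.1 + L.2.2 by omega,
                  show L.2.1 + L.2.2 ≤ bhi by omega,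
                  show bhi ≤ (b.length : Int) by omega⟩
              · simp at hr
            · split_ifs at hr with h
              · simp only [List.mem_singleton] at hr
                subst hr
                exact ⟨show (0 : Int) ≤ alo by omega,
                  show alo ≤ L.1 by omega,
                  show L.1 ≤ (a.length : Int) by omega,
                  show (0 : Int) ≤ blo by omega,
                  show blo ≤ L.2.1 by omega,
                  show L.2.1 ≤ (b.length : Int) by omega⟩
              · simp at hr
          · exact hQ r (List.mem_cons_of_mem _ hr)
        refine (ih _ _ hfuel' hQ').trans ?_
        -- identify the pushed rectangles' recursions with the two child recursions
        have hRpart : (((if L.1 + L.2.2 < ahi ∧ L.2.1 + L.2.2 < bhi then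
              [(L.1 + L.2.2, ahi, L.2.1 + L.2.2, bhi)] else []) : List (Int × Int × Int × Int)).flatMap
            (fun r => recBlocks a b ((r.2.1 - r.1).toNat + (r.2.2.2 - r.2.2.1).toNat)
              r.1 r.2.1 r.2.2.1 r.2.2.2))
            = recBlocks a b (w - 1) (L.1 + L.2.2) ahi (L.2.1 + L.2.2) bhi := by
          split_ifs with h
          · simp only [List.flatMap_cons, List.flatMap_nil, List.append_nil]
            exact recBlocks_fuel a b _ _ _ _ _ _ (by omega) (by rw [hw]; omega)
          · rw [recBlocks_degenerate a b _ _ _ _ _ (by omega)]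
            rfl
        have hLpart : (((if alo < L.1 ∧ blo < L.2.1 then
              [(alo, L.1, blo, L.2.1)] else []) : List (Int × Int × Int × Int)).flatMap
            (fun r => recBlocks a b ((r.2.1 - r.1).toNat + (r.2.2.2 - r.2.2.1).toNat)
              r.1 r.2.1 r.2.2.1 r.2.2.2))
            = recBlocks a b (w - 1) alo L.1 blo L.2.1 := by
          split_ifs with h
          · simp only [List.flatMap_cons, List.flatMap_nil, List.append_nil]
            exact recBlocks_fuel a b _ _ _ _ _ _ (by omega) (by rw [hw]; omega)
          · rw [recBlocks_degenerate a b _ _ _ _ _ (by omega)]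
            rfl
        have hhead : recBlocks a b w alo ahi blo bhi
            = recBlocks a b (w - 1) alo L.1 blo L.2.1 ++ [L] ++
              recBlocks a b (w - 1) (L.1 + L.2.2) ahi (L.2.1 + L.2.2) bhi := by
          conv_lhs => rw [show w = (w - 1) + 1 by omega, recBlocks]
          rw [← hL, if_pos hk]
        rw [List.flatMap_append, List.flatMap_append, hRpart, hLpart,
          List.flatMap_cons, hhead]
        simp only [List.append_assoc]
        apply List.Perm.append_left
        have hswap : ∀ (A B C : List (Int × Int × Int)),
            (A ++ (B ++ C)).Perm (B ++ (A ++ C)) := by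
          intro A B C
          rw [← List.append_assoc, ← List.append_assoc]
          exact (List.perm_append_comm).append_right C
        refine (List.Perm.append_left [L] (hswap _ _ _)).trans ?_
        exact hswap _ _ _
      · rw [mbLoop, dif_neg hk]
        rw [hflm] at hk
        have hfuel' : (rest.map
            (fun r => 3 ^ ((r.2.1 - r.1).toNat + (r.2.2.2 - r.2.2.1).toNat))).sum ≤ n := by
          omega
        refine (ih rest acc hfuel' (fun r hr => hQ r (List.mem_cons_of_mem _ hr))).trans ?_
        have hhead : recBlocks a b w alo ahi blo bhi = [] := by
          cases hww : w with
          | zero => rfl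
          | succ w' =>
            rw [recBlocks, if_neg hk]
        rw [List.flatMap_cons, hhead]
        simp

-- the key-value pairs of A's matching blocks are exactly those of B's recursion
theorem kvs_eq (d m : List String) :
    kvsOf (smMatchingBlocks d m)
      = kvsOf (recBlocks d m (d.length + m.length)
          0 (d.length : Int) 0 (m.length : Int)) := by
  have hroot : rectOK d m 0 (d.length : Int) 0 (m.length : Int) :=
    ⟨le_rfl, by positivity, le_rfl, le_rfl, by positivity, le_rfl⟩
  have hfix : (((d.length : Int) - 0).toNat + ((m.length : Int) - 0).toNat)
      = d.length + m.length := by simp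
  have hperm := mbLoop_perm d m (3 ^ (d.length + m.length))
    [(0, (d.length : Int), 0, (m.length : Int))] []
    (by simp)
    (by
      intro r hr
      simp only [List.mem_singleton] at hr
      subst hr
      exact hroot)
  rw [List.flatMap_cons, List.flatMap_nil, List.append_nil, List.nil_append] at hperm
  have hperm2 : (mbLoop d m (smB2j m) (3 ^ (d.length + m.length))
      [(0, (d.length : Int), 0, (m.length : Int))] []).Perm
      (recBlocks d m (d.length + m.length) 0 (d.length : Int) 0 (m.length : Int)) := by
    refine hperm.trans ?_
    have : (((0, (d.length : Int), 0, (m.length : Int)) : Int × Int × Int × Int).2.1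
        - (0, (d.length : Int), 0, (m.length : Int)).1).toNat
        + ((0, (d.length : Int), 0, (m.length : Int)).2.2.2
        - (0, (d.length : Int), 0, (m.length : Int)).2.2.1).toNat = d.length + m.length := hfix
    rw [this]
  -- the recursion's blocks are strictly increasing in their first component
  have hpw : (recBlocks d m (d.length + m.length)
      0 (d.length : Int) 0 (m.length : Int)).Pairwise (fun t t' => t.1 < t'.1) := by
    apply (recBlocks_pairwise d m (d.length + m.length)
      0 (d.length : Int) 0 (m.length : Int)).imp_of_mem
    intro t t' ht ht' h
    have := recBlocks_bounds d m (d.length + m.length)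
      0 (d.length : Int) 0 (m.length : Int) t ht
    omega
  have hsorted : PySem.List.sorted (mbLoop d m (smB2j m) (3 ^ (d.length + m.length))
      [(0, (d.length : Int), 0, (m.length : Int))] []) (fun t => t.1) false
      = recBlocks d m (d.length + m.length) 0 (d.length : Int) 0 (m.length : Int) :=
    PySem.List.sorted_eq_of_perm_of_pairwise_lt _ _ (fun t => t.1) hperm2.symm hpw
  simp only [smMatchingBlocks]
  rw [hsorted]
  have hpos : ∀ t ∈ recBlocks d m (d.length + m.length)
      0 (d.length : Int) 0 (m.length : Int), 0 ≤ t.2.2 := by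
    intro t ht
    have := recBlocks_bounds d m (d.length + m.length)
      0 (d.length : Int) 0 (m.length : Int) t ht
    omega
  have happ : kvsOf (smCoalesce 0 0 0 (recBlocks d m (d.length + m.length)
        0 (d.length : Int) 0 (m.length : Int))
      ++ [((d.length : Int), (m.length : Int), 0)])
      = kvsOf (smCoalesce 0 0 0 (recBlocks d m (d.length + m.length)
        0 (d.length : Int) 0 (m.length : Int)))
      ++ kvsOf [((d.length : Int), (m.length : Int), 0)] := by
    simp [kvsOf]
  rw [happ, coalesce_kvs _ 0 0 0 le_rfl hpos]
  have h1 : blkKvs ((0 : Int), (0 : Int), (0 : Int)) = [] := by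
    simp [blkKvs, PySem.List.pyRange_one_eq_nil le_rfl]
  have h2 : kvsOf [((d.length : Int), (m.length : Int), 0)] = [] := by
    simp [kvsOf, blkKvs, PySem.List.pyRange_one_eq_nil le_rfl]
  rw [h1, h2, List.nil_append, List.append_nil]

-- key range of a block's key-value pairs
theorem mem_blkKvs_key (p : Int × Int) (t : Int × Int × Int) (hp : p ∈ blkKvs t) :
    t.1 ≤ p.1 ∧ p.1 < t.1 + t.2.2 := by
  unfold blkKvs at hp
  obtain ⟨u, hu, he⟩ := List.mem_map.mp hp
  rw [PySem.List.mem_pyRange_one] at hu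
  subst he
  exact ⟨show t.1 ≤ t.1 + u by omega, show t.1 + u < t.1 + t.2.2 by omega⟩

-- key-value pairs of an ordered, disjoint block list have strictly increasing keys
theorem kvs_pairwise_blocks : ∀ bs : List (Int × Int × Int),
    bs.Pairwise (fun t t' => t.1 + t.2.2 ≤ t'.1) →
    (kvsOf bs).Pairwise (fun p q => p.1 < q.1) := by
  intro bs
  induction bs with
  | nil => intro _; simp [kvsOf]
  | cons t rest ih =>
    intro hpw
    obtain ⟨hhead, htail⟩ := List.pairwise_cons.mp hpw
    have hsplit : kvsOf (t :: rest) = blkKvs t ++ kvsOf rest := by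
      simp [kvsOf]
    rw [hsplit]
    apply List.pairwise_append.mpr
    refine ⟨?_, ih htail, ?_⟩
    · unfold blkKvs
      rw [List.pairwise_map]
      apply (PySem.List.pairwise_lt_pyRange_one 0 t.2.2).imp
      intro u v huv
      show t.1 + u < t.1 + v
      omega
    · intro p hp q hq
      obtain ⟨t', ht', hq'⟩ := List.mem_flatMap.mp hq
      have h1 := mem_blkKvs_key p t hp
      have h2 := mem_blkKvs_key q t' hq'
      have h3 := hhead t' ht'
      omega

-- strictly increasing keys, bounded by the window, for B's key-value pairs
theorem rec_kvs_sorted (d m : List String) :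
    (kvsOf (recBlocks d m (d.length + m.length)
        0 (d.length : Int) 0 (m.length : Int))).Pairwise (fun p q => p.1 < q.1) ∧
    ∀ p ∈ kvsOf (recBlocks d m (d.length + m.length)
        0 (d.length : Int) 0 (m.length : Int)), 0 ≤ p.1 ∧ p.1 < (d.length : Int) := by
  constructor
  · apply kvs_pairwise_blocks
    apply (recBlocks_pairwise d m (d.length + m.length)
      0 (d.length : Int) 0 (m.length : Int)).imp_of_mem
    intro t t' ht ht' h
    exact h
  · intro p hp
    obtain ⟨t, ht, hp'⟩ := List.mem_flatMap.mp hp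
    have hb := recBlocks_bounds d m (d.length + m.length)
      0 (d.length : Int) 0 (m.length : Int) t ht
    have hk := mem_blkKvs_key p t hp'
    omega

-- ===== VERDICT (by name: the statement is the Claim_ definition above) =====
theorem map_conflict_to_merge_spec : Claim_equal_map_conflict_to_merge := by
  intro d cf m _ hpre
  unfold Spec_map_conflict_to_merge map_conflict_to_merge map_conflict_to_merge_alt
  by_cases h : d = [] ∨ m = []
  · simp [h]
  · simp only [h, if_false]
    have hlen : d.length ≤ cf.length := by
      rcases hpre with h1 | h1 | h1
      · exact absurd (Or.inl h1) h
      · exact absurd (Or.inr h1) h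
      · exact h1
    obtain ⟨hpwKvs, hkbnd⟩ := rec_kvs_sorted d m
    set B := recBlocks d m (d.length + m.length) 0 (d.length : Int) 0 (m.length : Int)
      with hB
    have htab : B.foldl
        (fun t blk => (PySem.List.pyRange 0 blk.2.2 1).foldl
          (fun t k => t.insert (blk.1 + k) (blk.2.1 + k)) t)
        (PySem.Dict.empty : PySem.Dict Int Int)
        = (kvsOf B).foldl (fun t p => t.insert p.1 p.2)
            (PySem.Dict.empty : PySem.Dict Int Int) := by
      rw [kvsOf, foldl_flatMap]
      simp only [blkKvs, List.foldl_map]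
    rw [htab]
    set T := (kvsOf B).foldl (fun t p => t.insert p.1 p.2)
      (PySem.Dict.empty : PySem.Dict Int Int) with hT
    have hbnd : ∀ p ∈ kvsOf B, (0 : Int) ≤ p.1 ∧ p.1 < PySem.List.len cf := by
      intro p hp
      have := hkbnd p hp
      rw [PySem.List.len_eq]
      omega
    have hsome : ∀ p ∈ kvsOf B, T.get? p.1 = some p.2 := by
      intro p hp
      rw [hT]
      exact get?_foldl_insert_mem p.1 p.2 _ _ hpwKvs (by simpa using hp)
    have hnone : ∀ i : Int, (0 : Int) ≤ i → i < PySem.List.len cf →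
        (∀ p ∈ kvsOf B, p.1 ≠ i) → T.get? i = none := by
      intro i _ _ hne
      rw [hT, get?_foldl_insert_not_mem i _ _ hne]
      exact PySem.Dict.get?_empty i
    have hBfold : (PySem.List.enumerate cf 0).foldl
        (fun s p => if p.2 then
            (match T.get? p.1 with
             | some j => PySem.Set.add s (j + 1)
             | none => s)
          else s) PySem.Set.empty
        = (kvsOf B).foldl (addF cf) PySem.Set.empty := by
      rw [PySem.List.enumerate_eq_map_pyRange cf false, List.foldl_map]
      exact rangeFold cf T _ 0 (PySem.List.len cf) _ _ rfl hpwKvs hbnd hsome hnone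
    rw [hBfold, smOpcodes, opcodes_fold]
    rw [hB, ← kvs_eq d m]
    simp only [kvsOf]
    rw [foldl_flatMap]
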